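-- pv_equiv track=rewrite | github.com/holmogigi/UNIVERSITY_WORK--UBB_FMI-- | 1'st SEMESTER/PF (Programming Fundamentals)/A1/a1-913-Halmagyi-Nicholas/p3.py | special_days
-- ===== SOURCE A (Python) =====
-- def leap_year(year):
--     """
--     Return 1 if the year is a leap year
--     input: year
--     output: 1 if leap year, 0 otherwise
--     """
--     if (year%4==0 and year%100!=0) or year%400==0:
--         return 1
--     else:
--         return 0
--
-- def special_days(year,month,day):
--     """
--     The function returns the number of days the person has been alive for the first year of their life
--     input: year,month,day
--     output: days
--     """
--     if leap_year(year)==1: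
--         list=[0,31,29,31,30,31,30,31,31,30,31,30,31]
--     else:
--         list=[0,31,28,31,30,31,30,31,31,30,31,30,31]
--     days=list[month]-day
--     month+=1
--     while month<=12:
--         days+=list[month]
--         month+=1
--     return days
-- ===== SOURCE B (Python) =====
-- # Cumulative days elapsed before month m in a non-leap year (index 0 unused, matches month 0 = nothing elapsed).
-- CUM = [0, 0, 31, 59, 90, 120, 151, 181, 212, 243, 273, 304, 334]
--
-- def special_days(year, month, day):
--     leap = 1 if (year % 4 == 0 and year % 100 != 0) or year % 400 == 0 else 0
--     passed = CUM[month] + (leap if month >= 3 else 0) + day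
--     return 365 + leap - passed
-- ===== Notes on version B (the rewrite author's own statement) =====
-- stated objective: alternative
-- what changed: B replaces A's month-length list and backward accumulation loop by a single lookup in a precomputed cumulative-days table plus a leap adjustment, subtracted from the closed-form year total.
-- outside the precondition, e.g. on special_days(2021, -1, 15): A returns 381, B returns 16
import Mathlib
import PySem

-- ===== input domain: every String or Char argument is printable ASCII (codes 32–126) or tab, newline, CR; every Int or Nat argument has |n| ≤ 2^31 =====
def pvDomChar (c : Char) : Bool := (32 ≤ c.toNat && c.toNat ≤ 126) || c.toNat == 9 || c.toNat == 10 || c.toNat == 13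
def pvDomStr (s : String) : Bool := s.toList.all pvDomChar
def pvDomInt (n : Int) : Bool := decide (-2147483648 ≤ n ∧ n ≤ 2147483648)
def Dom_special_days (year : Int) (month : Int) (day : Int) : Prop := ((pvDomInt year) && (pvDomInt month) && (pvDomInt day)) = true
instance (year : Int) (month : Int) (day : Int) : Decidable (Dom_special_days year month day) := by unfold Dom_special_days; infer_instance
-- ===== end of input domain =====

-- B replaces A's month-length list and backward summation loop by one lookup in a precomputed
-- cumulative-days table plus a leap adjustment, subtracted from the closed-form year total.

-- ===== PORT A =====
def leap_year (year : Int) : Int :=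
  if (PySem.Int.mod year 4 == 0 && !(PySem.Int.mod year 100 == 0)) || PySem.Int.mod year 400 == 0 then 1 else 0

def special_days (year : Int) (month : Int) (day : Int) : Int :=
  let lst : List Int :=
    if leap_year year == 1 then [0,31,29,31,30,31,30,31,31,30,31,30,31]
    else [0,31,28,31,30,31,30,31,31,30,31,30,31]
  let days := PySem.List.pyGetD lst month 0 - day   -- list[month]; Pre_ keeps month a valid Python index
  (PySem.List.pyRange (month + 1) 13 1).foldl (fun d m => d + PySem.List.pyGetD lst m 0) days

-- ===== PORT B =====
-- cumulative days elapsed before month m in a non-leap year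
def pvCUM : List Int := [0, 0, 31, 59, 90, 120, 151, 181, 212, 243, 273, 304, 334]

def special_days_alt (year : Int) (month : Int) (day : Int) : Int :=
  let leap : Int :=
    if (PySem.Int.mod year 4 == 0 && !(PySem.Int.mod year 100 == 0)) || PySem.Int.mod year 400 == 0 then 1 else 0
  let passed : Int := PySem.List.pyGetD pvCUM month 0 + (if month ≥ 3 then leap else 0) + day
  365 + leap - passed

-- ===== PRECONDITION & SPEC =====
-- Pre_ restricts to the task's natural month domain 0..12 (A excludes index 0 itself via its
-- sentinel entry): a negative month is malformed input, on which A's value is an accident of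
-- Python's negative-index wraparound (it adds a full extra year), and month > 12 or month < -13
-- raises IndexError in A.
def Pre_special_days (year : Int) (month : Int) (day : Int) : Prop := 0 ≤ month ∧ month ≤ 12
instance (year : Int) (month : Int) (day : Int) : Decidable (Pre_special_days year month day) := by unfold Pre_special_days; infer_instance
def pvWitness_special_days : Int × Int × Int := (2021, 3, 14)

def Spec_special_days (year : Int) (month : Int) (day : Int) (out : Int) : Prop := out = special_days_alt year month day
instance (year : Int) (month : Int) (day : Int) (out : Int) : Decidable (Spec_special_days year month day out) := by unfold Spec_special_days; infer_instance

-- ===== CLAIM (what is proved, stated in full; the proofs are below) =====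
def Claim_equal_special_days : Prop := ∀ (year : Int) (month : Int) (day : Int), Dom_special_days year month day → Pre_special_days year month day → Spec_special_days year month day (special_days year month day)

-- ===== LEMMAS AND PROOFS =====
-- ===== VERDICT (by name: the statement is the Claim_ definition above) =====
set_option maxHeartbeats 1600000 in
theorem special_days_spec : Claim_equal_special_days := by
  intro year month day _ hPre
  obtain ⟨h0, h2⟩ := hPre
  unfold Spec_special_days special_days special_days_alt leap_year
  cases hl : ((PySem.Int.mod year 4 == 0 && !(PySem.Int.mod year 100 == 0)) || PySem.Int.mod year 400 == 0) <;>
    interval_cases month <;>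
      simp [pvCUM, PySem.List.pyRange, PySem.List.pyGetD, PySem.List.pyGet?,
        PySem.List.pyIdx?, List.range_succ] <;> omega
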